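-- pv_equiv track=rewrite | github.com/sdukesameer/python | week2a.py | primeproduct
-- ===== SOURCE A (Python) =====
-- def primeproduct(n):
--     p=1
--     for i in range(1,n):
--         if n%i==0:
--             p=p*i
--     if p==n:
--         return (True)
--     else:
--         return (False)
-- ===== SOURCE B (Python) =====
-- def primeproduct(n):
--     if n < 1:
--         return False
--     p = 1
--     i = 1
--     while i * i <= n:
--         if n % i == 0:
--             p *= i
--             j = n // i
--             if j != i and j != n:
--                 p *= j
--         i += 1
--     return p == n
-- ===== Notes on version B (the rewrite author's own statement) =====
-- stated objective: faster
-- what changed: Instead of multiplying every proper divisor found by trying all i in 1..n-1, B trials only i up to sqrt(n) and multiplies in each divisor pair (i, n//i), excluding n itself.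
import Mathlib
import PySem

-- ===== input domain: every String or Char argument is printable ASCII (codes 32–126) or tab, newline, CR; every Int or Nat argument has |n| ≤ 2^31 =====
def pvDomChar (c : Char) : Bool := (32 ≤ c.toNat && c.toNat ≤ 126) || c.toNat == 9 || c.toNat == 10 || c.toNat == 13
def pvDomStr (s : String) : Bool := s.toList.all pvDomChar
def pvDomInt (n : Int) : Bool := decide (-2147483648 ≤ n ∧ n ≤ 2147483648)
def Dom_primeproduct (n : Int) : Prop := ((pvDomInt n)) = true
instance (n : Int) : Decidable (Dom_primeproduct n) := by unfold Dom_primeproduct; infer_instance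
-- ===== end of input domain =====

-- B replaces A's scan of 1..n-1 with a scan of i up to sqrt(n) that multiplies in each divisor pair (i, n//i), excluding n itself.

-- ===== PORT A =====
def primeproduct (n : Int) : Bool :=
  let p := (PySem.List.pyRange 1 n 1).foldl
    (fun p i => if PySem.Int.mod n i = 0 then p * i else p) 1
  if p = n then true else false

-- ===== PORT B =====
-- fuel = n.toNat + 1 bounds the iteration count of Source B's 'while i*i <= n' loop
-- (i starts at 1 and increases by 1 each pass); it is a totality guard only.
def pvBLoop (n : Int) : Nat → Int → Int → Int
  | 0, _, p => p
  | fuel + 1, i, p =>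
    if i * i ≤ n then
      pvBLoop n fuel (i + 1)
        (if PySem.Int.mod n i = 0 then
          (let j := PySem.Int.floordiv n i
           if j ≠ i ∧ j ≠ n then p * i * j else p * i)
         else p)
    else p

def primeproduct_alt (n : Int) : Bool :=
  if n < 1 then false
  else decide (pvBLoop n (n.toNat + 1) 1 1 = n)

-- ===== PRECONDITION & SPEC =====
def Spec_primeproduct (n : Int) (out : Bool) : Prop := out = primeproduct_alt n
instance (n : Int) (out : Bool) : Decidable (Spec_primeproduct n out) := by unfold Spec_primeproduct; infer_instance

-- ===== CLAIM (what is proved, stated in full; the proofs are below) =====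
def Claim_equal_primeproduct : Prop := ∀ (n : Int), Dom_primeproduct n → Spec_primeproduct n (primeproduct n)

-- ===== LEMMAS AND PROOFS =====

-- contribution of a small divisor d in B's loop: d itself, times its partner m/d unless the partner is d or m
def pvContrib (m d : Nat) : Int :=
  (d : Int) * (if d * d < m ∧ d ≠ 1 then ((m / d : Nat) : Int) else 1)

-- accumulator form of A's conditional-product fold
lemma pvFoldProd (c : Nat → Prop) [DecidablePred c] (g : Nat → Int) :
    ∀ (r : Nat) (a : Int), (List.range r).foldl (fun p k => if c k then p * g k else p) a
      = a * ∏ k ∈ Finset.range r, (if c k then g k else 1) := by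
  intro r
  induction r with
  | zero => simp
  | succ r ih =>
    intro a
    rw [List.range_succ, List.foldl_append, ih, Finset.prod_range_succ]
    simp only [List.foldl]
    split_ifs <;> ring

-- A's fold over 1..n-1 is the product of the proper divisors of m = n.toNat
lemma pvA_eq (m : Nat) (hm : 1 ≤ m) :
    primeproduct (m : Int) = decide (((∏ d ∈ m.properDivisors, d : Nat) : Int) = (m : Int)) := by
  unfold primeproduct
  rw [PySem.List.pyRange_one]
  have h1 : ((m : Int) - 1).toNat = m - 1 := by omega
  rw [h1, List.foldl_map]
  have h2 : ∀ (p : Int) (k : Nat), (if PySem.Int.mod (m:Int) (1 + (k:Int)) = 0 then p * (1 + (k:Int)) else p)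
      = (if (fun k => (k+1) ∣ m) k then p * (((k+1 : Nat) : Int)) else p) := by
    intro p k
    have hcast : ((1:Int) + (k:Int)) = ((k+1 : Nat) : Int) := by push_cast; ring
    simp only [hcast, PySem.Int.mod_eq_zero_iff_dvd, Int.natCast_dvd_natCast]
  simp only [h2]
  rw [pvFoldProd (fun k => (k+1) ∣ m) (fun k => ((k+1 : Nat) : Int)) (m-1) 1, one_mul]
  have h3 : (∏ k ∈ Finset.range (m-1), (if (k+1) ∣ m then ((k+1 : Nat) : Int) else 1))
      = ((∏ d ∈ m.properDivisors, d : Nat) : Int) := by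
    rw [show m.properDivisors = Finset.filter (· ∣ m) (Finset.Ico 1 m) from rfl,
      Finset.prod_filter, Finset.prod_Ico_eq_prod_range]
    rw [Nat.cast_prod]
    apply Finset.prod_congr rfl
    intro k _
    have : 1 + k = k + 1 := by omega
    rw [this]
    split_ifs <;> simp
  rw [h3]
  simp only [Bool.if_false_right, Bool.and_true]

-- one step of B's filtered product
lemma pvStepProd (m i : Nat) (hm : 1 ≤ m) (f : Nat → Int) :
    ((m.divisors.filter (fun d => i ≤ d ∧ d * d ≤ m)).prod f)
      = (if i ∣ m ∧ i * i ≤ m then f i else 1)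
        * ((m.divisors.filter (fun d => i + 1 ≤ d ∧ d * d ≤ m)).prod f) := by
  rw [Finset.prod_filter, Finset.prod_filter]
  have key : ∀ d ∈ m.divisors,
      (if i ≤ d ∧ d * d ≤ m then f d else 1)
        = (if d = i then (if d * d ≤ m then f d else 1) else 1)
          * (if i + 1 ≤ d ∧ d * d ≤ m then f d else 1) := by
    intro d _
    by_cases hdi : d = i
    · subst hdi
      have h1 : ¬ (d + 1 ≤ d ∧ d * d ≤ m) := by omega
      rw [if_pos rfl, if_neg h1, mul_one]
      by_cases h2 : d * d ≤ m
      · rw [if_pos h2, if_pos ⟨le_refl d, h2⟩]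
      · rw [if_neg h2, if_neg (by tauto)]
    · rw [if_neg hdi, one_mul]
      have h3 : (i ≤ d ∧ d * d ≤ m) ↔ (i + 1 ≤ d ∧ d * d ≤ m) := by omega
      simp only [h3]
  rw [Finset.prod_congr rfl key, Finset.prod_mul_distrib,
    Finset.prod_ite_eq' m.divisors i (fun d => if d * d ≤ m then f d else 1)]
  congr 1
  by_cases h1 : i ∣ m <;> by_cases h2 : i * i ≤ m <;>
    simp [Nat.mem_divisors, h1, h2, (show m ≠ 0 by omega)]

-- B's loop computes p times the product of small-divisor contributions
lemma pvBLoop_eq (m : Nat) (hm : 1 ≤ m) :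
    ∀ (fuel i : Nat) (p : Int), 1 ≤ i → m + 1 ≤ fuel + i →
      pvBLoop (m : Int) fuel (i : Int) p
        = p * ((m.divisors.filter (fun d => i ≤ d ∧ d * d ≤ m)).prod (pvContrib m)) := by
  intro fuel
  induction fuel with
  | zero =>
    intro i p hi hfi
    have hempty : m.divisors.filter (fun d => i ≤ d ∧ d * d ≤ m) = ∅ := by
      apply Finset.filter_eq_empty_iff.mpr
      intro d hd
      have hdm : d ≤ m := Nat.le_of_dvd (by omega) (Nat.mem_divisors.mp hd).1
      omega
    simp [pvBLoop, hempty]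
  | succ fuel ih =>
    intro i p hi hfi
    rw [pvBLoop]
    by_cases hle : (i : Int) * (i : Int) ≤ (m : Int)
    · rw [if_pos hle]
      have hle' : i * i ≤ m := by exact_mod_cast hle
      rw [show ((i : Int) + 1) = ((i + 1 : Nat) : Int) by push_cast; ring]
      rw [ih (i + 1) _ (by omega) (by omega)]
      rw [pvStepProd m i hm (pvContrib m)]
      have hstep :
          (if PySem.Int.mod (m:Int) (i:Int) = 0 then
            (let j := PySem.Int.floordiv (m:Int) (i:Int)
             if j ≠ (i:Int) ∧ j ≠ (m:Int) then p * (i:Int) * j else p * (i:Int))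
           else p)
          = p * (if i ∣ m ∧ i * i ≤ m then pvContrib m i else 1) := by
        have hdvd_iff : (PySem.Int.mod (m:Int) (i:Int) = 0) ↔ i ∣ m := by
          rw [PySem.Int.mod_eq_zero_iff_dvd, Int.natCast_dvd_natCast]
        by_cases hdvd : i ∣ m
        · rw [if_pos (hdvd_iff.mpr hdvd),
            if_pos (show i ∣ m ∧ i * i ≤ m from ⟨hdvd, hle'⟩)]
          simp only [PySem.Int.floordiv_natCast]
          have hji : m / i = i ↔ i * i = m := by
            constructor
            · intro h
              have h2 := Nat.div_mul_cancel hdvd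
              rw [h] at h2; exact h2
            · intro h
              rw [← h, Nat.mul_div_cancel _ (by omega : 0 < i)]
          have hjm : m / i = m ↔ i = 1 := by
            constructor
            · intro h
              by_contra h1
              have := Nat.div_lt_self (by omega : 0 < m) (by omega : 1 < i)
              omega
            · intro h; subst h; exact Nat.div_one m
          unfold pvContrib
          by_cases hc : i * i < m ∧ i ≠ 1
          · have hne : ((m / i : Nat) : Int) ≠ (i : Int) ∧ ((m / i : Nat) : Int) ≠ (m : Int) := by
              constructor
              · rw [Ne, Int.natCast_inj, hji]; omega
              · rw [Ne, Int.natCast_inj, hjm]; exact hc.2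
            rw [if_pos hne, if_pos hc]; ring
          · have hne : ¬ (((m / i : Nat) : Int) ≠ (i : Int) ∧ ((m / i : Nat) : Int) ≠ (m : Int)) := by
              rw [not_and_or]
              by_cases h1 : i = 1
              · right; rw [Ne, Int.natCast_inj, not_not, hjm]; exact h1
              · left
                have : i * i = m := by
                  rcases Nat.lt_or_ge (i*i) m with h | h
                  · exact absurd ⟨h, h1⟩ hc
                  · omega
                rw [Ne, Int.natCast_inj, not_not, hji]; exact this
            rw [if_neg hne, if_neg hc, mul_one]
        · rw [if_neg (show ¬ PySem.Int.mod (m:Int) (i:Int) = 0 from fun h => hdvd (hdvd_iff.mp h)),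
            if_neg (show ¬ (i ∣ m ∧ i * i ≤ m) from fun h => hdvd h.1), mul_one]
      exact (congrArg (fun q => q * ((m.divisors.filter (fun d => i + 1 ≤ d ∧ d * d ≤ m)).prod (pvContrib m))) hstep).trans (by ring)
    · rw [if_neg hle]
      have hempty : m.divisors.filter (fun d => i ≤ d ∧ d * d ≤ m) = ∅ := by
        apply Finset.filter_eq_empty_iff.mpr
        intro d hd
        rintro ⟨h1, h2⟩
        have hnle : ¬ (i * i ≤ m) := by
          intro h; exact hle (by exact_mod_cast h)
        exact hnle (le_trans (Nat.mul_le_mul h1 h1) h2)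
      rw [hempty]; simp

lemma pvDivPos (m d : Nat) (hm : 1 ≤ m) (h : d ∣ m) : 1 ≤ d := by
  rcases Nat.eq_zero_or_pos d with h0 | h0
  · subst h0; simp at h; omega
  · exact h0

-- pairing d ↔ m/d: the small-divisor contributions multiply to the product of the proper divisors
lemma pvPairingNat (m : Nat) (hm : 2 ≤ m) :
    ((m.divisors.filter (fun d => d * d ≤ m)).prod (fun d => d * (if d * d < m ∧ d ≠ 1 then m / d else 1)))
      = ∏ d ∈ m.properDivisors, d := by
  rw [Finset.prod_mul_distrib]
  have h1 : ((m.divisors.filter (fun d => d * d ≤ m)).prod (fun d => if d * d < m ∧ d ≠ 1 then m / d else 1))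
      = ((m.divisors.filter (fun d => d * d < m ∧ d ≠ 1)).prod (fun d => m / d)) := by
    rw [Finset.prod_filter, Finset.prod_filter]
    apply Finset.prod_congr rfl
    intro d _
    split_ifs with h1 h2 h3 <;> first | rfl | omega
  rw [h1]
  have key : ∀ d, d ∣ m → d * d < m → d ≠ 1 → (m / d) ∣ m ∧ m < (m / d) * (m / d) ∧ (m / d) ≠ m := by
    intro d hdvd hlt hne1
    have hd1 : 1 ≤ d := pvDivPos m d (by omega) hdvd
    have hmul : m / d * d = m := Nat.div_mul_cancel hdvd
    refine ⟨Nat.div_dvd_of_dvd hdvd, ?_, ?_⟩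
    · nlinarith [hmul]
    · intro h
      have : d = 1 := by nlinarith [hmul]
      exact hne1 this
  have key2 : ∀ e, e ∣ m → m < e * e → e ≠ m → (m / e) ∣ m ∧ (m / e) * (m / e) < m ∧ (m / e) ≠ 1 := by
    intro e hdvd hlt hnem
    have he1 : 1 ≤ e := pvDivPos m e (by omega) hdvd
    have hmul : m / e * e = m := Nat.div_mul_cancel hdvd
    refine ⟨Nat.div_dvd_of_dvd hdvd, ?_, ?_⟩
    · nlinarith [hmul]
    · intro h
      rw [h, one_mul] at hmul
      exact hnem hmul
  have h2 : ((m.divisors.filter (fun d => d * d < m ∧ d ≠ 1)).prod (fun d => m / d))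
      = ((m.divisors.filter (fun e => m < e * e ∧ e ≠ m)).prod (fun e => e)) := by
    apply Finset.prod_bij (i := fun d _ => m / d)
    · intro d hd
      rw [Finset.mem_filter, Nat.mem_divisors] at hd ⊢
      obtain ⟨⟨hdvd, hm0⟩, hlt, hne1⟩ := hd
      obtain ⟨h3, h4, h5⟩ := key d hdvd hlt hne1
      exact ⟨⟨h3, hm0⟩, h4, h5⟩
    · intro a ha b hb hab
      rw [Finset.mem_filter, Nat.mem_divisors] at ha hb
      have := Nat.div_div_self ha.1.1 (by omega : m ≠ 0)
      rw [hab] at this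
      rw [← this, Nat.div_div_self hb.1.1 (by omega : m ≠ 0)]
    · intro e he
      rw [Finset.mem_filter, Nat.mem_divisors] at he
      obtain ⟨⟨hdvd, hm0⟩, hlt, hnem⟩ := he
      obtain ⟨h3, h4, h5⟩ := key2 e hdvd hlt hnem
      refine ⟨m / e, ?_, ?_⟩
      · rw [Finset.mem_filter, Nat.mem_divisors]
        exact ⟨⟨h3, hm0⟩, h4, h5⟩
      · exact Nat.div_div_self hdvd (by omega : m ≠ 0)
    · intro d hd; rfl
  rw [h2, ← Finset.prod_union]
  · have hset : (m.divisors.filter (fun d => d * d ≤ m)) ∪ (m.divisors.filter (fun e => m < e * e ∧ e ≠ m))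
        = m.properDivisors := by
      ext d
      simp only [Finset.mem_union, Finset.mem_filter, Nat.mem_divisors, Nat.mem_properDivisors]
      constructor
      · rintro (⟨⟨hdvd, hm0⟩, hle⟩ | ⟨⟨hdvd, hm0⟩, hlt, hne⟩)
        · refine ⟨hdvd, ?_⟩
          have := Nat.le_of_dvd (by omega) hdvd
          rcases Nat.lt_or_ge d m with h | h
          · exact h
          · have : d = m := by omega
            subst this; nlinarith
        · have := Nat.le_of_dvd (by omega) hdvd
          exact ⟨hdvd, by omega⟩
      · rintro ⟨hdvd, hlt⟩
        rcases Nat.lt_or_ge m (d * d) with h | h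
        · exact Or.inr ⟨⟨hdvd, by omega⟩, h, by omega⟩
        · exact Or.inl ⟨⟨hdvd, by omega⟩, h⟩
    rw [hset]
  · rw [Finset.disjoint_left]
    intro d hd hd2
    rw [Finset.mem_filter] at hd hd2
    omega

-- Int version of the pairing, with the loop's '1 ≤ d' filter component
lemma pvPairing (m : Nat) (hm : 2 ≤ m) :
    ((m.divisors.filter (fun d => 1 ≤ d ∧ d * d ≤ m)).prod (pvContrib m))
      = ((∏ d ∈ m.properDivisors, d : Nat) : Int) := by
  have hfil : (m.divisors.filter (fun d => 1 ≤ d ∧ d * d ≤ m))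
      = (m.divisors.filter (fun d => d * d ≤ m)) := by
    apply Finset.filter_congr
    intro d hd
    have := pvDivPos m d (by omega) (Nat.mem_divisors.mp hd).1
    simp [this]
  rw [hfil, ← pvPairingNat m hm, Nat.cast_prod]
  apply Finset.prod_congr rfl
  intro d _
  unfold pvContrib
  push_cast [apply_ite (fun x : Nat => (x : Int))]
  rfl

-- ===== VERDICT (by name: the statement is the Claim_ definition above) =====
theorem primeproduct_spec : Claim_equal_primeproduct := by
  intro n _
  unfold Spec_primeproduct
  rcases Int.lt_or_le 0 n with hn | hn
  case inr =>
    unfold primeproduct primeproduct_alt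
    rw [PySem.List.pyRange_one_eq_nil (by omega)]
    simp only [List.foldl_nil]
    rw [if_neg (by omega : ¬ (1:Int) = n), if_pos (by omega : n < 1)]
  case inl =>
    obtain ⟨m, rfl⟩ : ∃ m : Nat, n = (m : Int) := ⟨n.toNat, by omega⟩
    have hm : 1 ≤ m := by exact_mod_cast hn
    rcases eq_or_lt_of_le hm with h1 | h2
    · have : m = 1 := h1.symm
      subst this; decide
    · have hm2 : 2 ≤ m := h2
      rw [pvA_eq m hm]
      unfold primeproduct_alt
      rw [if_neg (by omega : ¬ (m : Int) < 1)]
      have htn : ((m : Int).toNat + 1) = m + 1 := by omega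
      rw [htn]
      have hloop := pvBLoop_eq m hm (m + 1) 1 1 (le_refl 1) (by omega)
      rw [show ((1:Nat) : Int) = (1 : Int) from rfl] at hloop
      rw [hloop, one_mul, pvPairing m hm2]
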